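-- pv_equiv track=rewrite | github.com/Nikoloz8/GOA-Group---34 | Day 095/Classwork/classwork.py | numbers_check
-- ===== SOURCE A (Python) =====
-- def numbers_check(a, b):
--     product_str = str(a * b)
--
--     ab_str = str(a) + str(b)
--
--     for digit in "0123456789":
--         count_product = product_str.count(digit)
--         count_ab = ab_str.count(digit)
--         if count_product != count_ab:
--             return False
--
--     return True
-- ===== SOURCE B (Python) =====
-- def numbers_check(a, b):
--     digits = "0123456789"
--     prod_digits = [c for c in str(a * b) if c in digits]
--     ab_digits = [c for c in str(a) + str(b) if c in digits]
--     return sorted(prod_digits) == sorted(ab_digits)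
-- ===== Notes on version B (the rewrite author's own statement) =====
-- stated objective: simpler
-- what changed: Replaces the ten per-digit .count passes and early-return loop with one filter of the digit characters of each string followed by a single sorted-list comparison.
import Mathlib
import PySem

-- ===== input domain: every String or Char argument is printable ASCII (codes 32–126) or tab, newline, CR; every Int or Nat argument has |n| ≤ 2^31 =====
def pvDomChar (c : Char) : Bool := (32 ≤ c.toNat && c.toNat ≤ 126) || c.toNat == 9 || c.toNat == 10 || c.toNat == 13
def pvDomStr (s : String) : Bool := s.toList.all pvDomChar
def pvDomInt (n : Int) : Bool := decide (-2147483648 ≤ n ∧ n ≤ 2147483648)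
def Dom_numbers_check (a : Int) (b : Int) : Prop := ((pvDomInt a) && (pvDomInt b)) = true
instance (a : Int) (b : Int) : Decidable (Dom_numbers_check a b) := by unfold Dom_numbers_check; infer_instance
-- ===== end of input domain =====

-- B replaces A's ten per-digit count passes by filtering the digit characters of each
-- string and comparing the two sorted lists once (objective: simpler).


-- ===== PORT A =====
-- the 'for digit in "0123456789"' loop with its early 'return False'
def pvALoop (product_str ab_str : String) : List Char → Bool
  | [] => true
  | digit :: rest =>
    let count_product := PySem.Str.count product_str (String.singleton digit)
    let count_ab := PySem.Str.count ab_str (String.singleton digit)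
    if count_product ≠ count_ab then false
    else pvALoop product_str ab_str rest

def numbers_check (a : Int) (b : Int) : Bool :=
  let product_str := PySem.Int.toStr (a * b)
  let ab_str := PySem.Int.toStr a ++ PySem.Int.toStr b
  pvALoop product_str ab_str "0123456789".toList

-- ===== PORT B =====
def numbers_check_alt (a : Int) (b : Int) : Bool :=
  let digits := "0123456789".toList
  let prod_digits := (PySem.Int.toChars (a * b)).filter (fun c => digits.contains c)
  let ab_digits := (PySem.Int.toChars a ++ PySem.Int.toChars b).filter (fun c => digits.contains c)
  PySem.List.sorted prod_digits (fun x => x) false == PySem.List.sorted ab_digits (fun x => x) false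

-- ===== PRECONDITION & SPEC =====
def Spec_numbers_check (a : Int) (b : Int) (out : Bool) : Prop := out = numbers_check_alt a b
instance (a : Int) (b : Int) (out : Bool) : Decidable (Spec_numbers_check a b out) := by unfold Spec_numbers_check; infer_instance

-- ===== CLAIM (what is proved, stated in full; the proofs are below) =====
def Claim_equal_numbers_check : Prop := ∀ (a : Int) (b : Int), Dom_numbers_check a b → Spec_numbers_check a b (numbers_check a b)

-- ===== LEMMAS AND PROOFS =====

-- counting a single character as a substring is List.count
theorem pvCountGo_singleton (c : Char) (l : List Char) (fuel acc : Nat)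
    (h : l.length ≤ fuel) :
    PySem.Chars.count.go [c] fuel l acc = acc + l.count c := by
  induction l generalizing fuel acc with
  | nil => cases fuel <;> simp [PySem.Chars.count.go]
  | cons x t ih =>
    cases fuel with
    | zero => simp at h
    | succ f =>
      have hf : t.length ≤ f := by simpa using h
      by_cases hx : x = c
      · subst hx
        simp [PySem.Chars.count.go, List.isPrefixOf, ih f (acc + 1) hf]
        omega
      · simp [PySem.Chars.count.go, List.isPrefixOf, hx, Ne.symm hx,
          ih f acc hf]

theorem pvCount_singleton (cs : List Char) (c : Char) :
    PySem.Chars.count cs [c] = cs.count c := by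
  simp [PySem.Chars.count, pvCountGo_singleton c cs cs.length 0 (le_refl _)]

theorem pvStrCount_singleton (s : String) (c : Char) :
    PySem.Str.count s (String.singleton c) = s.toList.count c := by
  simp [PySem.Str.count_eq, pvCount_singleton]

-- A's loop succeeds iff every listed digit has equal counts
theorem pvALoop_eq_true_iff (ps ab : String) (ds : List Char) :
    pvALoop ps ab ds = true ↔
      ∀ d ∈ ds, ps.toList.count d = ab.toList.count d := by
  induction ds with
  | nil => simp [pvALoop]
  | cons d rest ih =>
    simp only [pvALoop, pvStrCount_singleton]
    by_cases h : ps.toList.count d = ab.toList.count d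
    · simp [h, ih]
    · simp [h]

theorem numbers_check_eq (a b : Int) :
    numbers_check a b = numbers_check_alt a b := by
  unfold numbers_check numbers_check_alt
  rw [Bool.eq_iff_iff, pvALoop_eq_true_iff, beq_iff_eq,
      PySem.List.sorted_id_eq_sorted_id_iff_perm, List.perm_iff_count]
  simp only [PySem.Int.toList_toStr, String.toList_append]
  constructor
  · intro h c
    by_cases hc : ("0123456789".toList).contains c
    · rw [List.count_filter (by simpa using hc), List.count_filter (by simpa using hc)]
      exact h c (by simpa using hc)
    · have hz : ∀ l : List Char,
          List.count c (l.filter (fun x => ("0123456789".toList).contains x)) = 0 := by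
        intro l
        rw [List.count_eq_zero]
        intro hmem
        exact hc ((List.mem_filter.mp hmem).2)
      rw [hz, hz]
  · intro h d hd
    have := h d
    rw [List.count_filter (by simpa using hd), List.count_filter (by simpa using hd)] at this
    exact this

-- ===== VERDICT (by name: the statement is the Claim_ definition above) =====
theorem numbers_check_spec : Claim_equal_numbers_check := by
  intro a b _
  unfold Spec_numbers_check
  exact numbers_check_eq a b
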